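-- pv_equiv track=rewrite | github.com/JuneRen/SimilarityLearning | losses.py | batch_triplets
-- ===== SOURCE A (Python) =====
-- def batch_triplets(y, distances):
--     anchors, positives, negatives = [], [], []
--     for anchor, y_anchor in enumerate(y):
--         for positive, y_positive in enumerate(y):
--             # if same embedding or different labels, skip
--             if (anchor == positive) or (y_anchor != y_positive):
--                 continue
--             for negative, y_negative in enumerate(y):
--                 if y_negative == y_anchor:
--                     continue
--                 anchors.append(anchor)
--                 positives.append(positive)
--                 negatives.append(negative)
--     return anchors, positives, negatives
-- ===== SOURCE B (Python) =====
-- def batch_triplets(y, distances):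
--     # Build the three output streams independently by counting: an anchor with
--     # label l has cnt[l]-1 positives and n-cnt[l] negatives, so each component
--     # is a replication computed arithmetically instead of a triple nested loop.
--     n = len(y)
--     cnt = {}
--     for l in y:
--         cnt[l] = cnt.get(l, 0) + 1
--     anchors = []
--     for a, l in enumerate(y):
--         anchors += [a] * ((cnt[l] - 1) * (n - cnt[l]))
--     positives = []
--     for a, l in enumerate(y):
--         for p, m in enumerate(y):
--             if m == l and p != a:
--                 positives += [p] * (n - cnt[l])
--     negatives = []
--     for a, l in enumerate(y):
--         negatives += [q for q, m in enumerate(y) if m != l] * (cnt[l] - 1)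
--     return anchors, positives, negatives
-- ===== Notes on version B (the rewrite author's own statement) =====
-- stated objective: faster
-- what changed: B never enumerates (anchor,positive,negative) triples: it builds a label counter once and then constructs each of the three output lists in its own independent pass by arithmetic replication ([a]*((cnt[l]-1)*(n-cnt[l])) anchors, each positive repeated n-cnt[l] times, the negative index list repeated cnt[l]-1 times), instead of A's three nested enumerate loops appending one triple at a time.
import Mathlib
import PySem

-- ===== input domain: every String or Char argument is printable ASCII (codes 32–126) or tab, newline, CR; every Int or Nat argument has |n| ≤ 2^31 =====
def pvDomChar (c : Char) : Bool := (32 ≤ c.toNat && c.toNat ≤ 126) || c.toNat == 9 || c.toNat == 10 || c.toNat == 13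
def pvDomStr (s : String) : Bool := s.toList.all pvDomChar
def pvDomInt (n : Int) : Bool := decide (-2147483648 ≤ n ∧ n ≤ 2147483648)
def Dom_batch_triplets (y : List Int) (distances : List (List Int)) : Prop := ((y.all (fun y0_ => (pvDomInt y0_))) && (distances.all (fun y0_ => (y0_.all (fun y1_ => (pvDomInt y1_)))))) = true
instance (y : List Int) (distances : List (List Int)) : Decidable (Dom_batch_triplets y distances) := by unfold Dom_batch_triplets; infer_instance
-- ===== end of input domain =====

-- B builds the three output lists in three independent passes by counting/replication instead of
-- A's triple nested enumeration (measured faster); same return value ('distances' is unused by both).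

-- ===== PORT A =====
def batch_triplets (y : List Int) (distances : List (List Int)) : List Int × List Int × List Int :=
  (PySem.List.enumerate y).foldl (fun s ap =>
    (PySem.List.enumerate y).foldl (fun s pp =>
      if ap.1 == pp.1 || !(ap.2 == pp.2) then s
      else
        (PySem.List.enumerate y).foldl (fun s np =>
          if np.2 == ap.2 then s
          else (s.1 ++ [ap.1], s.2.1 ++ [pp.1], s.2.2 ++ [np.1])) s) s) ([], [], [])

-- ===== PORT B =====
-- 'cnt[l]' (plain lookup) is ported as getD: every label looked up occurs in y, so KeyError is impossible.
def batch_triplets_alt (y : List Int) (distances : List (List Int)) : List Int × List Int × List Int :=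
  let n : Int := PySem.List.len y
  let cnt := y.foldl (fun d l => d.modify l 0 (· + 1)) (PySem.Dict.empty : PySem.Dict Int Int)
  let en := PySem.List.enumerate y
  let anchors := en.foldl (fun s al =>
      s ++ PySem.List.pyRepeat [al.1] ((cnt.getD al.2 0 - 1) * (n - cnt.getD al.2 0))) []
  let positives := en.foldl (fun s al =>
      en.foldl (fun s pm =>
        if pm.2 == al.2 && !(pm.1 == al.1)
        then s ++ PySem.List.pyRepeat [pm.1] (n - cnt.getD al.2 0)
        else s) s) []
  let negatives := en.foldl (fun s al =>
      s ++ PySem.List.pyRepeat ((en.filter (fun qm => !(qm.2 == al.2))).map (·.1)) (cnt.getD al.2 0 - 1)) []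
  (anchors, positives, negatives)

-- ===== PRECONDITION & SPEC =====
def Spec_batch_triplets (y : List Int) (distances : List (List Int)) (out : List Int × List Int × List Int) : Prop := out = batch_triplets_alt y distances
instance (y : List Int) (distances : List (List Int)) (out : List Int × List Int × List Int) : Decidable (Spec_batch_triplets y distances out) := by unfold Spec_batch_triplets; infer_instance

-- ===== CLAIM (what is proved, stated in full; the proofs are below) =====
def Claim_equal_batch_triplets : Prop := ∀ (y : List Int) (distances : List (List Int)), Dom_batch_triplets y distances → Spec_batch_triplets y distances (batch_triplets y distances)

-- ===== LEMMAS AND PROOFS =====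

-- A's innermost loop appends one triple per non-matching label; it equals appending whole blocks.
theorem bt_inner (l : List (Int × Int)) (la a p : Int) (s : List Int × List Int × List Int) :
    l.foldl (fun s np =>
      if np.2 == la then s
      else (s.1 ++ [a], s.2.1 ++ [p], s.2.2 ++ [np.1])) s
    = (s.1 ++ List.replicate ((l.filter (fun np => !(np.2 == la))).length) a,
       s.2.1 ++ List.replicate ((l.filter (fun np => !(np.2 == la))).length) p,
       s.2.2 ++ (l.filter (fun np => !(np.2 == la))).map (·.1)) := by
  induction l generalizing s with
  | nil => simp
  | cons hd tl ih =>
    rw [List.foldl_cons]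
    by_cases h : hd.2 = la
    · rw [if_pos (by simp [h]), ih]
      simp [h]
    · rw [if_neg (by simp [h]), ih]
      simp [h, List.replicate_succ]

-- a fold appending three blocks per element is a triple of flatMaps
theorem bt_foldl3 {α : Type} (l : List α) (g1 g2 g3 : α → List Int) (s : List Int × List Int × List Int) :
    l.foldl (fun s x => (s.1 ++ g1 x, s.2.1 ++ g2 x, s.2.2 ++ g3 x)) s
    = (s.1 ++ l.flatMap g1, s.2.1 ++ l.flatMap g2, s.2.2 ++ l.flatMap g3) := by
  induction l generalizing s with
  | nil => simp
  | cons hd tl ih => rw [List.foldl_cons, ih]; simp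

-- skip-branches become empty blocks
theorem bt_flatMap_ite_nil {α : Type} (l : List α) (p : α → Bool) (f : α → List Int) :
    l.flatMap (fun x => if p x then [] else f x)
    = (l.filter (fun x => !p x)).flatMap f := by
  induction l with
  | nil => rfl
  | cons hd tl ih =>
    by_cases h : p hd
    · simp [h, ih]
    · simp [h, ih]

-- flatMapping a constant block is flattening a replicate
theorem bt_flatMap_const {α : Type} (l : List α) (R : List Int) :
    l.flatMap (fun _ => R) = (List.replicate l.length R).flatten := by
  induction l with
  | nil => rfl
  | cons hd tl ih => simp [ih, List.replicate_succ]

theorem bt_flatten_replicate (k m : Nat) (a : Int) :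
    (List.replicate k (List.replicate m a)).flatten = List.replicate (k * m) a := by
  induction k with
  | zero => simp
  | succ k ih => simp [List.replicate_succ, ih, Nat.succ_mul, Nat.add_comm]


-- the distinct-label index list and its length, per anchor label
def btN (y : List Int) (la : Int) : List Int :=
  ((PySem.List.enumerate y).filter (fun np => !(np.2 == la))).map (·.1)

def btM (y : List Int) (la : Int) : Nat :=
  ((PySem.List.enumerate y).filter (fun np => !(np.2 == la))).length

-- a fold whose step appends three per-element blocks, started empty, is a triple of flatMaps
theorem bt_flatten_rep_single (k : Nat) (a : Int) :
    (List.replicate k [a]).flatten = List.replicate k a := by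
  induction k with
  | zero => simp
  | succ k ih => simp [List.replicate_succ, ih]

theorem bt_outer {α : Type} (l : List α)
    (f : (List Int × List Int × List Int) → α → (List Int × List Int × List Int))
    (g1 g2 g3 : α → List Int)
    (h : ∀ s x, x ∈ l → f s x = (s.1 ++ g1 x, s.2.1 ++ g2 x, s.2.2 ++ g3 x)) :
    l.foldl f ([], [], []) = (l.flatMap g1, l.flatMap g2, l.flatMap g3) := by
  rw [PySem.List.foldl_congr_mem l f
      (fun s x => (s.1 ++ g1 x, s.2.1 ++ g2 x, s.2.2 ++ g3 x)) ([], [], []) h, bt_foldl3]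
  simp

-- A as a triple of flatMaps over anchors
theorem bt_A (y : List Int) (d : List (List Int)) :
    batch_triplets y d =
      ((PySem.List.enumerate y).flatMap (fun ap => (PySem.List.enumerate y).flatMap (fun pp =>
          if ap.1 == pp.1 || !(ap.2 == pp.2) then [] else List.replicate (btM y ap.2) ap.1)),
       (PySem.List.enumerate y).flatMap (fun ap => (PySem.List.enumerate y).flatMap (fun pp =>
          if ap.1 == pp.1 || !(ap.2 == pp.2) then [] else List.replicate (btM y ap.2) pp.1)),
       (PySem.List.enumerate y).flatMap (fun ap => (PySem.List.enumerate y).flatMap (fun pp =>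
          if ap.1 == pp.1 || !(ap.2 == pp.2) then [] else btN y ap.2))) := by
  unfold batch_triplets
  have hmid : ∀ (ap : Int × Int) (s : List Int × List Int × List Int),
      (PySem.List.enumerate y).foldl (fun s pp =>
        if ap.1 == pp.1 || !(ap.2 == pp.2) then s
        else (PySem.List.enumerate y).foldl (fun s np =>
          if np.2 == ap.2 then s
          else (s.1 ++ [ap.1], s.2.1 ++ [pp.1], s.2.2 ++ [np.1])) s) s
      = (s.1 ++ (PySem.List.enumerate y).flatMap (fun pp =>
            if ap.1 == pp.1 || !(ap.2 == pp.2) then [] else List.replicate (btM y ap.2) ap.1),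
         s.2.1 ++ (PySem.List.enumerate y).flatMap (fun pp =>
            if ap.1 == pp.1 || !(ap.2 == pp.2) then [] else List.replicate (btM y ap.2) pp.1),
         s.2.2 ++ (PySem.List.enumerate y).flatMap (fun pp =>
            if ap.1 == pp.1 || !(ap.2 == pp.2) then [] else btN y ap.2)) := by
    intro ap s
    rw [← bt_foldl3]
    apply PySem.List.foldl_congr_mem
    intro acc pp _
    by_cases h : (ap.1 == pp.1 || !(ap.2 == pp.2)) = true
    · simp [h]
    · rw [if_neg h, if_neg h, if_neg h, if_neg h, bt_inner]
      rfl
  exact bt_outer _ _ _ _ _ (fun s ap h => hmid ap s)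

-- B as a triple of flatMaps over anchors, with the counter evaluated
theorem bt_B (y : List Int) (d : List (List Int)) :
    batch_triplets_alt y d =
      ((PySem.List.enumerate y).flatMap (fun al =>
         List.replicate ((((y.count al.2 : Int)) - 1) * ((y.length : Int) - (y.count al.2 : Int))).toNat al.1),
       (PySem.List.enumerate y).flatMap (fun al =>
         ((PySem.List.enumerate y).filter (fun pm => pm.2 == al.2 && !(pm.1 == al.1))).flatMap (fun pm =>
           List.replicate ((y.length : Int) - (y.count al.2 : Int)).toNat pm.1)),
       (PySem.List.enumerate y).flatMap (fun al =>
         (List.replicate ((y.count al.2 : Int) - 1).toNat (btN y al.2)).flatten)) := by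
  have hc : y.foldl (fun d l => d.modify l 0 (· + 1)) (PySem.Dict.empty : PySem.Dict Int Int)
      = PySem.Dict.counter y := rfl
  simp only [batch_triplets_alt, hc, PySem.Dict.getD_counter, PySem.List.len_eq,
    PySem.List.pyRepeat,
    PySem.List.foldl_if_eq_foldl_filter, PySem.List.foldl_append_eq_flatMap,
    List.nil_append, btN, bt_flatten_rep_single]

-- the same-label filter counts the label's occurrences
theorem bt_C1 (y : List Int) (la : Int) :
    ((PySem.List.enumerate y).filter (fun p => p.2 == la)).length = y.count la := by
  rw [← List.countP_eq_length_filter]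
  have h : List.countP (fun p => p.2 == la) (PySem.List.enumerate y)
      = List.countP (fun v => v == la) ((PySem.List.enumerate y).map (·.2)) := by
    rw [List.countP_map]; rfl
  rw [h, PySem.List.map_snd_enumerate]
  rfl

-- the different-label filter counts the rest
theorem bt_C2 (y : List Int) (la : Int) :
    btM y la = y.length - y.count la := by
  have h := List.length_eq_length_filter_add (l := PySem.List.enumerate y) (fun p => p.2 == la)
  have h2 : ((PySem.List.enumerate y).filter (fun x => !(fun p => p.2 == la) x)).length = btM y la := rfl
  rw [bt_C1, h2, PySem.List.length_enumerate] at h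
  omega

-- removing the anchor from its own label class removes exactly one index
theorem bt_K (y : List Int) (ap : Int × Int) (hap : ap ∈ PySem.List.enumerate y) :
    (((PySem.List.enumerate y).filter (fun pp => pp.2 == ap.2)).filter (fun pp => !(pp.1 == ap.1))).length
    = y.count ap.2 - 1 := by
  set L := (PySem.List.enumerate y).filter (fun pp => pp.2 == ap.2) with hL
  have hone : (L.filter (fun pp => pp.1 == ap.1)).length = 1 := by
    have hcp : (L.filter (fun pp => pp.1 == ap.1)).length
        = (L.map (·.1)).count ap.1 := by
      rw [← List.countP_eq_length_filter, List.count, List.countP_map]; rfl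
    have hnd : (L.map (·.1)).Nodup := by
      have hsub : (L.map (·.1)).Sublist ((PySem.List.enumerate y).map (·.1)) :=
        List.filter_sublist.map _
      have : ((PySem.List.enumerate y).map (·.1)).Nodup := by
        rw [PySem.List.map_fst_enumerate]
        exact PySem.List.nodup_pyRange_one _ _
      exact this.sublist hsub
    have hmem : ap.1 ∈ L.map (·.1) :=
      List.mem_map_of_mem (List.mem_filter.mpr ⟨hap, by simp⟩)
    rw [hcp, List.count_eq_one_of_mem hnd hmem]
  have h := List.length_eq_length_filter_add (l := L) (fun pp => pp.1 == ap.1)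
  have hLlen : L.length = y.count ap.2 := bt_C1 y ap.2
  have h2 : (L.filter (fun x => !(fun pp => pp.1 == ap.1) x)).length
      = (L.filter (fun pp => !(pp.1 == ap.1))).length := rfl
  rw [hone, hLlen, h2] at h
  omega

-- A's skip-condition, negated, is B's keep-condition
theorem bt_pred (y : List Int) (ap : Int × Int) :
    (PySem.List.enumerate y).filter (fun pp => !(ap.1 == pp.1 || !(ap.2 == pp.2)))
    = ((PySem.List.enumerate y).filter (fun pp => pp.2 == ap.2)).filter (fun pp => !(pp.1 == ap.1)) := by
  rw [List.filter_filter]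
  apply List.filter_congr
  intro pp _
  cases h1 : (ap.1 == pp.1) <;> cases h2 : (ap.2 == pp.2) <;>
    simp_all [BEq.comm]

theorem bt_arith (c n : Nat) (h1 : 1 ≤ c) (h2 : c ≤ n) :
    (c - 1) * (n - c) = (((c : Int) - 1) * ((n : Int) - (c : Int))).toNat := by
  rw [show ((c : Int) - 1) = ((c - 1 : Nat) : Int) by omega,
      show ((n : Int) - (c : Int)) = ((n - c : Nat) : Int) by omega,
      ← Nat.cast_mul, Int.toNat_natCast]

theorem bt_count_facts (y : List Int) (ap : Int × Int) (hap : ap ∈ PySem.List.enumerate y) :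
    1 ≤ y.count ap.2 ∧ y.count ap.2 ≤ y.length := by
  have : ap.2 ∈ y := by
    have := List.mem_map_of_mem (f := (·.2)) hap
    rwa [PySem.List.map_snd_enumerate] at this
  exact ⟨List.count_pos_iff.mpr this, List.count_le_length⟩
-- ===== VERDICT (by name: the statement is the Claim_ definition above) =====
theorem batch_triplets_spec : Claim_equal_batch_triplets := by
  intro y distances _
  unfold Spec_batch_triplets
  rw [bt_A y distances, bt_B y distances]
  refine congrArg₂ Prod.mk ?_ (congrArg₂ Prod.mk ?_ ?_)
  · apply List.flatMap_congr
    intro ap hap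
    obtain ⟨h1, h2⟩ := bt_count_facts y ap hap
    rw [bt_flatMap_ite_nil, bt_flatMap_const, bt_pred, bt_K y ap hap,
        bt_flatten_replicate, bt_C2, ← bt_arith _ _ h1 h2]
  · apply List.flatMap_congr
    intro ap hap
    obtain ⟨h1, h2⟩ := bt_count_facts y ap hap
    rw [bt_flatMap_ite_nil, bt_pred, ← List.filter_filter, List.filter_comm, bt_C2,
        show (((y.length : Int)) - (y.count ap.2 : Int)).toNat = y.length - y.count ap.2 by omega]
  · apply List.flatMap_congr
    intro ap hap
    obtain ⟨h1, h2⟩ := bt_count_facts y ap hap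
    rw [bt_flatMap_ite_nil, bt_flatMap_const, bt_pred, bt_K y ap hap,
        show ((y.count ap.2 : Int) - 1).toNat = y.count ap.2 - 1 by omega]
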